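-- pv_equiv track=rewrite | github.com/akfamily/akshare | akshare/futures/futures_hf_em.py | __futures_global_hist_market_code
-- ===== SOURCE A (Python) =====
-- from typing import Optional
--
-- def __futures_global_hist_market_code(symbol: str = "HG00Y") -> Optional[int]:
--     """
--     东方财富网-行情中心-期货市场-国际期货-品种市场对照表
--     https://quote.eastmoney.com/center/gridlist.html#futures_global
--     :param symbol: HG00Y, 品种代码；可以通过 ak.futures_global_spot_em() 来获取所有可获取历史行情数据的品种代码
--     :type symbol: str
--     :return: 品种所属于的市场
--     :rtype: str
--     """
--     # 提取品种代码（去掉年份和月份部分）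
--     base_symbol = ""
--     i = 0
--     while i < len(symbol) and not symbol[i].isdigit():
--         base_symbol += symbol[i]
--         i += 1
--     # 如果代码中没有数字（异常情况），则返回整个代码作为基础品种代码
--     if not base_symbol and i == len(symbol):
--         base_symbol = symbol
--     # 金属和贵金属品种 - 101
--     if base_symbol in ["HG", "GC", "SI", "QI", "QO", "MGC", "LTH"]:
--         return 101
--     # 能源品种 - 102
--     if base_symbol in ["CL", "NG", "RB", "HO", "PA", "PL", "QM"]:
--         return 102
--     # 农产品和金融品种 - 103
--     if base_symbol in [
--         "ZW",
--         "ZM",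
--         "ZS",
--         "ZC",
--         "XC",
--         "XK",
--         "XW",
--         "YM",
--         "TY",
--         "US",
--         "EH",
--         "ZL",
--         "ZR",
--         "ZO",
--         "FV",
--         "TU",
--         "UL",
--         "NQ",
--         "ES",
--     ]:
--         return 103
--     # 中国市场特有品种 - 104
--     if base_symbol in ["TF", "RT", "CN"]:
--         return 104
--     # 软商品期货 - 108
--     if base_symbol in ["SB", "CT", "SF"]:
--         return 108
--     # 特殊L开头品种 - 109
--     if base_symbol in ["LCPT", "LZNT", "LALT", "LTNT", "LLDT", "LNKT"]:
--         return 109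
--     # MPM开头品种 - 110
--     if base_symbol == "MPM":
--         return 110
--     # 日本市场品种 - 111
--     if base_symbol.startswith("J"):
--         return 111
--     # 单字母代码品种 - 112
--     if base_symbol in ["M", "B", "G"]:
--         return 112
--     # 如果没有匹配到任何规则，返回一个默认值或者错误
--     return None
-- ===== SOURCE B (Python) =====
-- from typing import Optional
--
-- # Flat rule list: (base, market code).  A rule matches when the symbol starts with
-- # `base` and the match is "anchored": the symbol either ends there or continues with
-- # a digit (the contract-month part).  Since bases contain no digits, exactly the rule
-- # equal to the symbol's full non-digit prefix can match, so no prefix extraction pass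
-- # is needed at all.
-- _RULES = [
--     ("HG", 101), ("GC", 101), ("SI", 101), ("QI", 101), ("QO", 101), ("MGC", 101), ("LTH", 101),
--     ("CL", 102), ("NG", 102), ("RB", 102), ("HO", 102), ("PA", 102), ("PL", 102), ("QM", 102),
--     ("ZW", 103), ("ZM", 103), ("ZS", 103), ("ZC", 103), ("XC", 103), ("XK", 103), ("XW", 103),
--     ("YM", 103), ("TY", 103), ("US", 103), ("EH", 103), ("ZL", 103), ("ZR", 103), ("ZO", 103),
--     ("FV", 103), ("TU", 103), ("UL", 103), ("NQ", 103), ("ES", 103),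
--     ("TF", 104), ("RT", 104), ("CN", 104),
--     ("SB", 108), ("CT", 108), ("SF", 108),
--     ("LCPT", 109), ("LZNT", 109), ("LALT", 109), ("LTNT", 109), ("LLDT", 109), ("LNKT", 109),
--     ("MPM", 110),
--     ("M", 112), ("B", 112), ("G", 112),
-- ]
--
--
-- def __futures_global_hist_market_code(symbol: str = "HG00Y") -> Optional[int]:
--     for base, code in _RULES:
--         n = len(base)
--         if symbol[:n] == base and (len(symbol) == n or symbol[n].isdigit()):
--             return code
--     return 111 if symbol[:1] == "J" else None
-- ===== Notes on version B (the rewrite author's own statement) =====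
-- stated objective: alternative
-- what changed: Instead of extracting the non-digit prefix char-by-char (quadratic string concatenation) and then running eight membership-branch tests on it, B never computes the prefix: it scans one flat rule list and matches each base directly against the raw symbol with an anchored startswith test (the symbol continues with a digit or ends there), falling back to the J-prefix rule.
import Mathlib
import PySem

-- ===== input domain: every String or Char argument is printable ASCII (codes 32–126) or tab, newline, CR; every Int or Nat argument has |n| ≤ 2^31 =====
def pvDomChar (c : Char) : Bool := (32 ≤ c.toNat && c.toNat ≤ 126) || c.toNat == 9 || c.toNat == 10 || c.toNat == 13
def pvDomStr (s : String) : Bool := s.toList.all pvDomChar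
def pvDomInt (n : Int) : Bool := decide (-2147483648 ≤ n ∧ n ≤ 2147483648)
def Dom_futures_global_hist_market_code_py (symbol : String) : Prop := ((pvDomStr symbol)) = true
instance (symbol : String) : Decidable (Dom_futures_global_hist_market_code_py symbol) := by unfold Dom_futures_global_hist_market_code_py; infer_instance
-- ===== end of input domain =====

-- B never extracts the non-digit prefix: it scans a flat rule list and matches each base
-- against the raw symbol with an anchored prefix test (alternative decomposition, same cost class).

-- ===== PORT A =====
-- the while loop: accumulates non-digit prefix chars, returns (base_symbol, remaining chars)
def pvScanA : List Char → List Char → List Char × List Char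
  | acc, [] => (acc, [])
  | acc, c :: rest =>
      if PySem.Chars.isdigit c then (acc, c :: rest) else pvScanA (acc ++ [c]) rest

def futures_global_hist_market_code_py (symbol : String) : Option Int :=
  let scan := pvScanA [] symbol.toList
  let base0 := String.ofList scan.1
  -- 'if not base_symbol and i == len(symbol)': i == len(symbol) ↔ no chars remain
  let base := if base0 = "" ∧ scan.2 = [] then symbol else base0
  if base ∈ (["HG", "GC", "SI", "QI", "QO", "MGC", "LTH"] : List String) then some 101
  else if base ∈ (["CL", "NG", "RB", "HO", "PA", "PL", "QM"] : List String) then some 102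
  else if base ∈ (["ZW", "ZM", "ZS", "ZC", "XC", "XK", "XW", "YM", "TY", "US", "EH",
                   "ZL", "ZR", "ZO", "FV", "TU", "UL", "NQ", "ES"] : List String) then some 103
  else if base ∈ (["TF", "RT", "CN"] : List String) then some 104
  else if base ∈ (["SB", "CT", "SF"] : List String) then some 108
  else if base ∈ (["LCPT", "LZNT", "LALT", "LTNT", "LLDT", "LNKT"] : List String) then some 109
  else if base = "MPM" then some 110
  else if PySem.Str.startswith base "J" then some 111
  else if base ∈ (["M", "B", "G"] : List String) then some 112
  else none

-- ===== PORT B =====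
-- the flat rule list _RULES
def pvRules : List (String × Int) := [
  ("HG", 101), ("GC", 101), ("SI", 101), ("QI", 101), ("QO", 101), ("MGC", 101), ("LTH", 101),
  ("CL", 102), ("NG", 102), ("RB", 102), ("HO", 102), ("PA", 102), ("PL", 102), ("QM", 102),
  ("ZW", 103), ("ZM", 103), ("ZS", 103), ("ZC", 103), ("XC", 103), ("XK", 103), ("XW", 103),
  ("YM", 103), ("TY", 103), ("US", 103), ("EH", 103), ("ZL", 103), ("ZR", 103), ("ZO", 103),
  ("FV", 103), ("TU", 103), ("UL", 103), ("NQ", 103), ("ES", 103),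
  ("TF", 104), ("RT", 104), ("CN", 104),
  ("SB", 108), ("CT", 108), ("SF", 108),
  ("LCPT", 109), ("LZNT", 109), ("LALT", 109), ("LTNT", 109), ("LLDT", 109), ("LNKT", 109),
  ("MPM", 110),
  ("M", 112), ("B", 112), ("G", 112)]

-- symbol[n].isdigit(), evaluated by B only when n < len(symbol)
def pvDigitAt (s : List Char) (n : Nat) : Bool :=
  match s[n]? with
  | some c => PySem.Chars.isdigit c
  | none => false

-- B's for-loop over the rules: first anchored match wins
def pvFindRule : List (String × Int) → List Char → Option Int
  | [], _ => none
  | (base, code) :: rest, s =>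
      let n := base.toList.length
      if s.take n = base.toList ∧ (s.length = n ∨ pvDigitAt s n = true) then some code
      else pvFindRule rest s

def futures_global_hist_market_code_py_alt (symbol : String) : Option Int :=
  match pvFindRule pvRules symbol.toList with
  | some code => some code
  | none => if symbol.toList.take 1 = ['J'] then some 111 else none

-- ===== PRECONDITION & SPEC =====
def Spec_futures_global_hist_market_code_py (symbol : String) (out : Option Int) : Prop := out = futures_global_hist_market_code_py_alt symbol
instance (symbol : String) (out : Option Int) : Decidable (Spec_futures_global_hist_market_code_py symbol out) := by unfold Spec_futures_global_hist_market_code_py; infer_instance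

-- ===== CLAIM (what is proved, stated in full; the proofs are below) =====
def Claim_equal_futures_global_hist_market_code_py : Prop := ∀ (symbol : String), Dom_futures_global_hist_market_code_py symbol → Spec_futures_global_hist_market_code_py symbol (futures_global_hist_market_code_py symbol)

-- ===== LEMMAS AND PROOFS =====

-- A's while loop computes the non-digit prefix (takeWhile) and leaves the rest (dropWhile)
theorem pvScanA_eq (cs acc : List Char) :
    pvScanA acc cs = (acc ++ cs.takeWhile (fun c => !PySem.Chars.isdigit c),
                      cs.dropWhile (fun c => !PySem.Chars.isdigit c)) := by
  induction cs generalizing acc with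
  | nil => simp [pvScanA]
  | cons c rest ih =>
      by_cases h : PySem.Chars.isdigit c <;> simp [pvScanA, h, ih]

-- B's anchored match succeeds exactly on the rule equal to the full non-digit prefix
theorem pvAnchor_iff (bl : List Char) (s : List Char)
    (h : bl.all (fun c => !PySem.Chars.isdigit c) = true) :
    (s.take bl.length = bl ∧ (s.length = bl.length ∨ pvDigitAt s bl.length = true)) ↔
      s.takeWhile (fun c => !PySem.Chars.isdigit c) = bl := by
  induction bl generalizing s with
  | nil =>
      cases s with
      | nil => simp [pvDigitAt]
      | cons a s' =>
          simp only [List.length_nil, List.take_zero, List.takeWhile_cons, pvDigitAt,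
            List.getElem?_cons_zero, List.length_cons, true_and]
          constructor
          · rintro (h0 | hd)
            · omega
            · simp [hd]
          · intro ht
            by_cases ha : PySem.Chars.isdigit a
            · exact Or.inr ha
            · simp [ha] at ht
  | cons b bl' ih =>
      simp only [List.all_cons, Bool.and_eq_true] at h
      cases s with
      | nil => simp
      | cons a s' =>
          have ih' := ih s' h.2
          simp only [List.length_cons, List.take_succ_cons, List.takeWhile_cons, List.cons.injEq]
          constructor
          · rintro ⟨⟨rfl, htake⟩, hrest⟩
            have hb : (!PySem.Chars.isdigit a) = true := h.1
            simp only [hb, if_true, List.cons.injEq]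
            refine ⟨trivial, (ih').mp ⟨htake, ?_⟩⟩
            rcases hrest with h0 | hd
            · left; omega
            · right; simpa [pvDigitAt] using hd
          · intro hc
            by_cases ha : PySem.Chars.isdigit a
            · simp [ha] at hc
            · simp only [ha, Bool.not_false, if_true, List.cons.injEq] at hc
              obtain ⟨rfl, ht⟩ := hc
              obtain ⟨h1, h2⟩ := (ih').mpr ht
              refine ⟨⟨rfl, h1⟩, ?_⟩
              rcases h2 with h0 | hd
              · left; omega
              · right; simpa [pvDigitAt] using hd

-- hence the rule scan is a lookup of the non-digit prefix in the rule list
theorem pvFindRule_eq (rs : List (String × Int)) (s : List Char)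
    (h : ∀ r ∈ rs, r.1.toList.all (fun c => !PySem.Chars.isdigit c) = true) :
    pvFindRule rs s =
      (rs.find? (fun r => r.1.toList = s.takeWhile (fun c => !PySem.Chars.isdigit c))).map Prod.snd := by
  induction rs with
  | nil => simp [pvFindRule]
  | cons r rest ih =>
      obtain ⟨base, code⟩ := r
      have hb := h _ (List.mem_cons_self ..)
      have hrest := fun r hr => h r (List.mem_cons_of_mem _ hr)
      simp only [pvFindRule, List.find?_cons]
      by_cases hm : s.take base.toList.length = base.toList ∧
          (s.length = base.toList.length ∨ pvDigitAt s base.toList.length = true)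
      · have heq := (pvAnchor_iff base.toList s hb).mp hm
        rw [if_pos hm]
        simp [heq]
      · have hne : ¬ base.toList = s.takeWhile (fun c => !PySem.Chars.isdigit c) := by
          intro he
          exact hm ((pvAnchor_iff base.toList s hb).mpr he.symm)
        rw [if_neg hm, ih hrest]
        simp [hne]

-- startswith on the prefix equals a first-char test on the raw symbol ('J' is no digit)
theorem pvStartJ (s : List Char) :
    PySem.Chars.startswith (s.takeWhile (fun c => !PySem.Chars.isdigit c)) ['J'] =
      (s.take 1 == ['J']) := by
  cases s with
  | nil => simp [PySem.Chars.startswith]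
  | cons a s' =>
      by_cases ha : a = 'J'
      · subst ha
        simp [PySem.Chars.startswith, List.isPrefixOf, PySem.Chars.isdigit]
      · by_cases hd : PySem.Chars.isdigit a <;>
          simp [hd, PySem.Chars.startswith, List.isPrefixOf, ha, Ne.symm ha]

-- ===== VERDICT (by name: the statement is the Claim_ definition above) =====
set_option maxRecDepth 16000 in
set_option maxHeartbeats 4000000 in
theorem futures_global_hist_market_code_py_spec : Claim_equal_futures_global_hist_market_code_py := by
  intro symbol _
  unfold Spec_futures_global_hist_market_code_py
  unfold futures_global_hist_market_code_py futures_global_hist_market_code_py_alt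
  rw [pvScanA_eq, pvFindRule_eq _ _ (by decide)]
  simp only [List.nil_append]
  have hJ : (symbol.toList.take 1 = ['J']) ↔
      (PySem.Chars.startswith (symbol.toList.takeWhile (fun c => !PySem.Chars.isdigit c)) ['J'] = true) := by
    rw [pvStartJ symbol.toList]
    exact beq_iff_eq.symm
  simp only [hJ]
  by_cases hdeg : String.ofList (symbol.toList.takeWhile (fun c => !PySem.Chars.isdigit c)) = "" ∧
      symbol.toList.dropWhile (fun c => !PySem.Chars.isdigit c) = []
  · obtain ⟨h1, h2⟩ := hdeg
    have ht : symbol.toList.takeWhile (fun c => !PySem.Chars.isdigit c) = [] := by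
      simpa using congrArg String.toList h1
    have hnil : symbol.toList = [] := by
      have := symbol.toList.takeWhile_append_dropWhile (p := fun c => !PySem.Chars.isdigit c)
      rw [ht, h2] at this
      simpa using this.symm
    have hsym : symbol = "" := by
      simpa [hnil] using (@String.ofList_toList symbol).symm
    subst hsym
    decide
  · rw [if_neg hdeg]
    generalize symbol.toList.takeWhile (fun c => !PySem.Chars.isdigit c) = t
    -- case on whether the prefix is one of the 49 rule bases
    by_cases hb : String.ofList t ∈ (["HG", "GC", "SI", "QI", "QO", "MGC", "LTH", "CL", "NG",
        "RB", "HO", "PA", "PL", "QM", "ZW", "ZM", "ZS", "ZC", "XC", "XK", "XW", "YM", "TY",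
        "US", "EH", "ZL", "ZR", "ZO", "FV", "TU", "UL", "NQ", "ES", "TF", "RT", "CN", "SB",
        "CT", "SF", "LCPT", "LZNT", "LALT", "LTNT", "LLDT", "LNKT", "MPM", "M", "B", "G"] : List String)
  -- from ofList t = a literal string, recover t as a literal char list and compute both sides
    · have hlit : ∀ (w : String), String.ofList t = w → t = w.toList := by
        intro w hw
        simpa using congrArg String.toList hw
      simp only [List.mem_cons, List.not_mem_nil, or_false] at hb
      rcases hb with hw|hw|hw|hw|hw|hw|hw|hw|hw|hw|hw|hw|hw|hw|hw|hw|hw|hw|hw|hw|hw|hw|hw|hw|hw|hw|hw|hw|hw|hw|hw|hw|hw|hw|hw|hw|hw|hw|hw|hw|hw|hw|hw|hw|hw|hw|hw|hw|hw <;>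
        · rw [hlit _ hw]
          decide
    · have hn1 : String.ofList t ∉ (["HG", "GC", "SI", "QI", "QO", "MGC", "LTH"] : List String) :=
        fun hm => hb ((by decide : _ ⊆ (["HG", "GC", "SI", "QI", "QO", "MGC", "LTH", "CL", "NG", "RB", "HO", "PA", "PL", "QM", "ZW", "ZM", "ZS", "ZC", "XC", "XK", "XW", "YM", "TY", "US", "EH", "ZL", "ZR", "ZO", "FV", "TU", "UL", "NQ", "ES", "TF", "RT", "CN", "SB", "CT", "SF", "LCPT", "LZNT", "LALT", "LTNT", "LLDT", "LNKT", "MPM", "M", "B", "G"] : List String)) hm)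
      have hn2 : String.ofList t ∉ (["CL", "NG", "RB", "HO", "PA", "PL", "QM"] : List String) :=
        fun hm => hb ((by decide : _ ⊆ (["HG", "GC", "SI", "QI", "QO", "MGC", "LTH", "CL", "NG", "RB", "HO", "PA", "PL", "QM", "ZW", "ZM", "ZS", "ZC", "XC", "XK", "XW", "YM", "TY", "US", "EH", "ZL", "ZR", "ZO", "FV", "TU", "UL", "NQ", "ES", "TF", "RT", "CN", "SB", "CT", "SF", "LCPT", "LZNT", "LALT", "LTNT", "LLDT", "LNKT", "MPM", "M", "B", "G"] : List String)) hm)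
      have hn3 : String.ofList t ∉ (["ZW", "ZM", "ZS", "ZC", "XC", "XK", "XW", "YM", "TY", "US",
          "EH", "ZL", "ZR", "ZO", "FV", "TU", "UL", "NQ", "ES"] : List String) :=
        fun hm => hb ((by decide : _ ⊆ (["HG", "GC", "SI", "QI", "QO", "MGC", "LTH", "CL", "NG", "RB", "HO", "PA", "PL", "QM", "ZW", "ZM", "ZS", "ZC", "XC", "XK", "XW", "YM", "TY", "US", "EH", "ZL", "ZR", "ZO", "FV", "TU", "UL", "NQ", "ES", "TF", "RT", "CN", "SB", "CT", "SF", "LCPT", "LZNT", "LALT", "LTNT", "LLDT", "LNKT", "MPM", "M", "B", "G"] : List String)) hm)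
      have hn4 : String.ofList t ∉ (["TF", "RT", "CN"] : List String) :=
        fun hm => hb ((by decide : _ ⊆ (["HG", "GC", "SI", "QI", "QO", "MGC", "LTH", "CL", "NG", "RB", "HO", "PA", "PL", "QM", "ZW", "ZM", "ZS", "ZC", "XC", "XK", "XW", "YM", "TY", "US", "EH", "ZL", "ZR", "ZO", "FV", "TU", "UL", "NQ", "ES", "TF", "RT", "CN", "SB", "CT", "SF", "LCPT", "LZNT", "LALT", "LTNT", "LLDT", "LNKT", "MPM", "M", "B", "G"] : List String)) hm)
      have hn5 : String.ofList t ∉ (["SB", "CT", "SF"] : List String) :=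
        fun hm => hb ((by decide : _ ⊆ (["HG", "GC", "SI", "QI", "QO", "MGC", "LTH", "CL", "NG", "RB", "HO", "PA", "PL", "QM", "ZW", "ZM", "ZS", "ZC", "XC", "XK", "XW", "YM", "TY", "US", "EH", "ZL", "ZR", "ZO", "FV", "TU", "UL", "NQ", "ES", "TF", "RT", "CN", "SB", "CT", "SF", "LCPT", "LZNT", "LALT", "LTNT", "LLDT", "LNKT", "MPM", "M", "B", "G"] : List String)) hm)
      have hn6 : String.ofList t ∉ (["LCPT", "LZNT", "LALT", "LTNT", "LLDT", "LNKT"] : List String) :=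
        fun hm => hb ((by decide : _ ⊆ (["HG", "GC", "SI", "QI", "QO", "MGC", "LTH", "CL", "NG", "RB", "HO", "PA", "PL", "QM", "ZW", "ZM", "ZS", "ZC", "XC", "XK", "XW", "YM", "TY", "US", "EH", "ZL", "ZR", "ZO", "FV", "TU", "UL", "NQ", "ES", "TF", "RT", "CN", "SB", "CT", "SF", "LCPT", "LZNT", "LALT", "LTNT", "LLDT", "LNKT", "MPM", "M", "B", "G"] : List String)) hm)
      have hn7 : String.ofList t ∉ (["M", "B", "G"] : List String) :=
        fun hm => hb ((by decide : _ ⊆ (["HG", "GC", "SI", "QI", "QO", "MGC", "LTH", "CL", "NG", "RB", "HO", "PA", "PL", "QM", "ZW", "ZM", "ZS", "ZC", "XC", "XK", "XW", "YM", "TY", "US", "EH", "ZL", "ZR", "ZO", "FV", "TU", "UL", "NQ", "ES", "TF", "RT", "CN", "SB", "CT", "SF", "LCPT", "LZNT", "LALT", "LTNT", "LLDT", "LNKT", "MPM", "M", "B", "G"] : List String)) hm)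
      have hnM : ¬ String.ofList t = "MPM" := fun he => hb (by rw [he]; decide)
      have hfind : (pvRules.find? (fun r => r.1.toList = t)).map Prod.snd = none := by
        rw [List.find?_eq_none.mpr]
        · rfl
        · intro r hr
          simp only [decide_eq_true_eq]
          intro he
          apply hb
          have h1 : String.ofList t = r.1 := by rw [← he]; simp
          rw [h1]
          fin_cases hr <;> decide
      rw [hfind]
      have hS : PySem.Str.startswith (String.ofList t) "J" = PySem.Chars.startswith t ['J'] := by
        simp [PySem.Str.startswith_eq]
      rw [hS]
      by_cases hj : PySem.Chars.startswith t ['J'] = true <;>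
        simp [hn1, hn2, hn3, hn4, hn5, hn6, hn7, hnM, hj]
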